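-- pv_equiv track=rewrite | github.com/weekyear/algorithm | 2021/04/24/괄호 변환.py | solution
-- ===== SOURCE A (Python) =====
-- def solution(p):
--     def isRight(string):
--         stack = 0
--         for s in string:
--             if s == '(':
--                 stack += 1
--             elif s == ')':
--                 stack -= 1
--             if stack < 0:
--                 return False
--         if stack == 0:
--             return True
--         return False
--
--     def divideUV(string):
--         stack = 0
--         for s in range(len(string)):
--             if string[s] == '(':
--                 stack += 1
--             elif string[s] == ')':
--                 stack -= 1
--             if stack == 0:
--                 return s + 1
--
--     def recur(string):
--         if string == '':
--             return ''
--         idx = divideUV(string)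
--         u, v = string[:idx], string[idx:]
--         if isRight(u):
--             return u + recur(v)
--         else:
--             n_string = '('
--             n_string += recur(v) + ')'
--             new_u = ''
--             for n in u[1:len(u) - 1]:
--                 if n == '(':
--                     new_u += ')'
--                 else:
--                     new_u += '('
--             n_string += new_u
--             return n_string
--
--     return recur(p)
-- ===== SOURCE B (Python) =====
-- def solution(p):
--     # One pass: cut p into primitive balanced chunks whenever the balance
--     # counter returns to zero, then combine the chunks right-to-left.
--     chunks = []
--     cur = []
--     bal = 0
--     for c in p:
--         cur.append(c)
--         if c == '(':
--             bal += 1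
--         elif c == ')':
--             bal -= 1
--         if bal == 0:
--             chunks.append(''.join(cur))
--             cur = []
--     acc = ''
--     for u in reversed(chunks):
--         if u[0] != ')':
--             acc = u + acc
--         else:
--             acc = '(' + acc + ')' + ''.join(')' if ch == '(' else '(' for ch in u[1:-1])
--     return acc
-- ===== Notes on version B (the rewrite author's own statement) =====
-- stated objective: alternative
-- what changed: A's suffix recursion (re-scanning and re-slicing each suffix with divideUV/isRight and recursing) is replaced by a single balance-counter pass that cuts p into primitive balanced chunks, followed by an explicit right-to-left fold over the chunk list that keeps or wraps each chunk.
-- outside the precondition, e.g. on solution('('): A raises RecursionError, B returns ''; on solution(')'): A raises RecursionError, B returns ''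
import Mathlib
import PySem

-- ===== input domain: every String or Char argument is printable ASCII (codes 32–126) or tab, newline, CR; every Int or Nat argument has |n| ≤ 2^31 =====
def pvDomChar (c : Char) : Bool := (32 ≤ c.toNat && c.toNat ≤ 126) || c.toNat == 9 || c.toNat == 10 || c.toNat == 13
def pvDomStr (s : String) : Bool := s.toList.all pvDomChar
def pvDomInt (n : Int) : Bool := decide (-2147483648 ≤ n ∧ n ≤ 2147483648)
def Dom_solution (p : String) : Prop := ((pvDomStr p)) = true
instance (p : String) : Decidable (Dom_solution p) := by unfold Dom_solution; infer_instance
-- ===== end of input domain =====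

-- B replaces A's suffix recursion by one balance-counter pass cutting p into primitive
-- balanced chunks plus a right-to-left fold over the chunk list (objective: alternative
-- decomposition).

-- ===== PORT A =====
-- 'isRight' inner helper: walks the string with a counter, early-exits on a negative prefix
def pvIsRightGo : List Char → Int → Bool
  | [], stack => stack == 0
  | c :: rest, stack =>
    let stack := if c = '(' then stack + 1 else if c = ')' then stack - 1 else stack
    if stack < 0 then false else pvIsRightGo rest stack

-- 'divideUV' inner helper: index of the first prefix of balance 0 (none = Python returns None)
def pvDivideGo : List Char → Int → Nat → Option Nat
  | [], _, _ => none
  | c :: rest, stack, s =>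
    let stack := if c = '(' then stack + 1 else if c = ')' then stack - 1 else stack
    if stack = 0 then some (s + 1) else pvDivideGo rest stack (s + 1)

-- the 'for n in u[1:len(u)-1]' loop building new_u by appending
def pvFlipGo : List Char → List Char → List Char
  | acc, [] => acc
  | acc, n :: rest => pvFlipGo (acc ++ [if n = '(' then ')' else '(']) rest

-- 'recur', made total with fuel (= |p|+1 suffices: each step consumes ≥ 1 character).
-- When divideUV returns None the Python recurses forever (RecursionError); Pre_ excludes
-- those inputs, so the 'none => []' arm is never reached under Pre_.
def pvRecur : Nat → List Char → List Char
  | 0, _ => []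
  | fuel + 1, s =>
    if s = [] then []
    else
      match pvDivideGo s 0 0 with
      | none => []
      | some idx =>
        let u := s.take idx
        let v := s.drop idx
        if pvIsRightGo u 0 then u ++ pvRecur fuel v
        else '(' :: (pvRecur fuel v ++ [')']) ++
          pvFlipGo [] (PySem.List.slice u (some 1) (some ((u.length : Int) - 1)))

def solution (p : String) : String := String.ofList (pvRecur (p.toList.length + 1) p.toList)

-- ===== PORT B =====
-- one pass: cut a primitive balanced chunk whenever the counter returns to 0
def pvChunksGo : List Char → Int → List Char → List (List Char)
  | [], _, _ => []
  | c :: rest, bal, cur =>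
    let cur := cur ++ [c]
    let bal := if c = '(' then bal + 1 else if c = ')' then bal - 1 else bal
    if bal = 0 then cur :: pvChunksGo rest 0 [] else pvChunksGo rest bal cur

-- body of B's right-to-left loop; chunks are never empty, so the headD default is unreachable
def pvStepB (u acc : List Char) : List Char :=
  if u.headD ' ' ≠ ')' then u ++ acc
  else '(' :: acc ++ [')'] ++ (u.tail.dropLast.map fun ch => if ch = '(' then ')' else '(')
  -- u.tail.dropLast = u[1:-1]

def solution_alt (p : String) : String :=
  String.ofList ((pvChunksGo p.toList 0 []).foldr pvStepB [])

-- ===== PRECONDITION & SPEC =====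
-- Pre_ holds exactly when p has as many '(' as ')': otherwise Python's recur eventually hits
-- a suffix divideUV cannot split and recurses on the same string forever (RecursionError).
def Pre_solution (p : String) : Prop := p.toList.count '(' = p.toList.count ')'
instance (p : String) : Decidable (Pre_solution p) := by unfold Pre_solution; infer_instance
def pvWitness_solution : String := ")("

def Spec_solution (p : String) (out : String) : Prop := out = solution_alt p
instance (p : String) (out : String) : Decidable (Spec_solution p out) := by unfold Spec_solution; infer_instance

-- ===== CLAIM (what is proved, stated in full; the proofs are below) =====
def Claim_equal_solution : Prop := ∀ (p : String), Dom_solution p → Pre_solution p → Spec_solution p (solution p)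

-- ===== LEMMAS AND PROOFS =====

-- the balance step both programs use
def pvBal (b : Int) (c : Char) : Int := if c = '(' then b + 1 else if c = ')' then b - 1 else b

theorem pvBal_count (s : List Char) : ∀ b : Int, s.foldl pvBal b = b + s.count '(' - s.count ')' := by
  induction s with
  | nil => intro b; simp
  | cons c rest ih =>
    intro b
    by_cases h1 : c = '('
    · simp [h1, pvBal, ih]; omega
    · by_cases h2 : c = ')'
      · simp [h2, pvBal, ih]; omega
      · simp [pvBal, h1, h2, ih]

theorem pvDivide_bounds (s : List Char) : ∀ (b : Int) (pos n : Nat),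
    pvDivideGo s b pos = some n → pos < n ∧ n ≤ pos + s.length := by
  induction s with
  | nil => intro b pos n h; simp [pvDivideGo] at h
  | cons c rest ih =>
    intro b pos n h
    simp only [pvDivideGo] at h
    have hstep : (if c = '(' then b + 1 else if c = ')' then b - 1 else b) = pvBal b c := rfl
    rw [hstep] at h
    by_cases h0 : pvBal b c = 0
    · rw [if_pos h0] at h; simp at h; simp; omega
    · rw [if_neg h0] at h
      have := ih _ _ _ h; simp; omega

theorem pvDivide_isSome (s : List Char) : ∀ (b : Int) (pos : Nat), s ≠ [] →
    s.foldl pvBal b = 0 → (pvDivideGo s b pos).isSome := by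
  induction s with
  | nil => intro _ _ h; exact absurd rfl h
  | cons c rest ih =>
    intro b pos _ hbal
    simp only [pvDivideGo]
    have hstep : (if c = '(' then b + 1 else if c = ')' then b - 1 else b) = pvBal b c := rfl
    rw [hstep]
    split
    · rfl
    · rename_i hne
      rcases rest with _ | ⟨d, r⟩
      · simp [List.foldl] at hbal; exact absurd hbal hne
      · exact ih _ _ (by simp) (by simpa [List.foldl] using hbal)

theorem pvDivide_split (s : List Char) : ∀ (b : Int) (pos n : Nat) (cur : List Char),
    pvDivideGo s b pos = some (pos + n) →
    1 ≤ n ∧ n ≤ s.length ∧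
    pvChunksGo s b cur = (cur ++ s.take n) :: pvChunksGo (s.drop n) 0 [] ∧
    (s.take n).foldl pvBal b = 0 := by
  induction s with
  | nil => intro b pos n cur h; simp [pvDivideGo] at h
  | cons c rest ih =>
    intro b pos n cur h
    simp only [pvDivideGo] at h
    have hstep : (if c = '(' then b + 1 else if c = ')' then b - 1 else b) = pvBal b c := rfl
    rw [hstep] at h
    by_cases h0 : pvBal b c = 0
    · rw [if_pos h0] at h
      have hn : n = 1 := by simp at h; omega
      subst hn
      refine ⟨le_refl 1, by simp, ?_, by simp [List.foldl, h0]⟩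
      simp only [pvChunksGo, hstep, if_pos h0, List.take_succ_cons, List.take_zero, List.drop_succ_cons, List.drop_zero]
    · rw [if_neg h0] at h
      have hb := pvDivide_bounds rest _ _ _ h
      have hn2 : 2 ≤ n := by omega
      have h' : pvDivideGo rest (pvBal b c) (pos + 1) = some ((pos + 1) + (n - 1)) := by
        rw [h]; congr 1; omega
      obtain ⟨h1, h2, h3, h4⟩ := ih _ _ _ (cur ++ [c]) h'
      have hns : n = (n - 1) + 1 := by omega
      refine ⟨by omega, by simp; omega, ?_, ?_⟩
      · rw [hns]
        simp only [pvChunksGo, hstep, if_neg h0, List.take_succ_cons, List.drop_succ_cons]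
        rw [h3]; simp
      · rw [hns]
        simpa [List.foldl] using h4

theorem pvIsRight_of_divide (rest : List Char) : ∀ (stack : Int) (pos n : Nat),
    0 < stack → pvDivideGo rest stack pos = some (pos + n) →
    pvIsRightGo (rest.take n) stack = true := by
  induction rest with
  | nil => intro stack pos n _ h; simp [pvDivideGo] at h
  | cons c r ih =>
    intro stack pos n hpos h
    simp only [pvDivideGo] at h
    have hstep : (if c = '(' then stack + 1 else if c = ')' then stack - 1 else stack) = pvBal stack c := rfl
    rw [hstep] at h
    by_cases h0 : pvBal stack c = 0
    · rw [if_pos h0] at h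
      have hn : n = 1 := by simp at h; omega
      subst hn
      simp [pvIsRightGo, pvBal] at h0 ⊢
      split_ifs at h0 ⊢ <;> simp_all
    · rw [if_neg h0] at h
      have hb := pvDivide_bounds r _ _ _ h
      have h' : pvDivideGo r (pvBal stack c) (pos + 1) = some ((pos + 1) + (n - 1)) := by
        rw [h]; congr 1; omega
      have hpos' : 0 < pvBal stack c := by
        simp only [pvBal] at h0 ⊢; split_ifs at h0 ⊢ <;> omega
      have hih := ih _ _ _ hpos' h'
      have hns : n = (n - 1) + 1 := by omega
      rw [hns, List.take_succ_cons]
      simp only [pvIsRightGo, hstep]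
      rw [if_neg (by omega)]
      exact hih

theorem pvFlipGo_map (l : List Char) : ∀ acc : List Char,
    pvFlipGo acc l = acc ++ l.map (fun ch => if ch = '(' then ')' else '(') := by
  induction l with
  | nil => intro acc; simp [pvFlipGo]
  | cons c r ih => intro acc; simp [pvFlipGo, ih]

theorem pvMain : ∀ (fuel : Nat) (s : List Char), s.length < fuel → s.foldl pvBal 0 = 0 →
    pvRecur fuel s = (pvChunksGo s 0 []).foldr pvStepB [] := by
  intro fuel
  induction fuel with
  | zero => intro s h; omega
  | succ f ih =>
    intro s hlen hbal
    match hs : s with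
    | [] => simp [pvRecur, pvChunksGo]
    | c :: rest =>
    have hne : (c :: rest) ≠ ([] : List Char) := by simp
    have hsome := pvDivide_isSome (c :: rest) 0 0 hne (by simpa [hs] using hbal)
    obtain ⟨n, hdiv⟩ := Option.isSome_iff_exists.mp hsome
    have hdiv0 : pvDivideGo (c :: rest) 0 0 = some (0 + n) := by simpa using hdiv
    obtain ⟨hn1, hn2, hsplit, htake⟩ := pvDivide_split (c :: rest) 0 0 n [] hdiv0
    simp only [List.nil_append] at hsplit
    -- balance of the remaining suffix is 0
    have hvbal : ((c :: rest).drop n).foldl pvBal 0 = 0 := by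
      have happ := List.foldl_append (f := pvBal) (b := (0 : Int))
        (l := (c :: rest).take n) (l' := (c :: rest).drop n)
      rw [List.take_append_drop, htake] at happ
      rw [← happ]; simpa [hs] using hbal
    have hvlen : ((c :: rest).drop n).length < f := by
      rw [List.length_drop]
      simp only [List.length_cons] at hlen ⊢
      omega
    have hih := ih _ hvlen hvbal
    -- unfold A one step
    simp only [pvRecur, if_neg hne, hdiv]
    -- unfold B one step
    rw [hsplit, List.foldr_cons, ← hih]
    -- case on the first character of the chunk
    by_cases hc1 : c = '('
    · -- u starts with '(' : right chunk on both sides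
      have hd' : pvDivideGo rest 1 1 = some (1 + (n - 1)) := by
        have h2' := hdiv0
        rw [hc1] at h2'
        simp only [pvDivideGo] at h2'
        norm_num at h2'
        rw [h2']; congr 1
        have := pvDivide_bounds rest 1 1 n h2'
        omega
      have hright := pvIsRight_of_divide rest 1 1 (n - 1) (by norm_num) hd'
      have hu : (c :: rest).take n = c :: rest.take (n - 1) := by
        obtain ⟨m, hm⟩ : ∃ m, n = m + 1 := ⟨n - 1, by omega⟩
        subst hm; simp
      have hisr : pvIsRightGo ((c :: rest).take n) 0 = true := by
        rw [hu, hc1]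
        simp only [pvIsRightGo]
        norm_num
        exact hright
      rw [if_pos hisr]
      have hhead : ((c :: rest).take n).headD ' ' ≠ ')' := by
        rw [hu, hc1]; simp
      simp only [pvStepB]
      rw [if_pos hhead]
    · by_cases hc2 : c = ')'
      · -- u starts with ')' : wrong chunk on both sides
        have hu : (c :: rest).take n = c :: rest.take (n - 1) := by
          obtain ⟨m, hm⟩ : ∃ m, n = m + 1 := ⟨n - 1, by omega⟩
          subst hm; simp
        have hisr : pvIsRightGo ((c :: rest).take n) 0 = false := by
          rw [hu, hc2]
          simp only [pvIsRightGo, if_true]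
          rw [if_neg (show ¬ (')' = '(') from by decide)]
          norm_num
        rw [if_neg (by simp [hisr])]
        have hhead : ¬ (((c :: rest).take n).headD ' ' ≠ ')') := by
          rw [hu, hc2]; simp
        simp only [pvStepB]
        rw [if_neg hhead]
        -- slice u 1 (len-1) = u.tail.dropLast
        have hn2' : n ≤ rest.length + 1 := by simpa using hn2
        have hulen : ((c :: rest).take n).length = n := by
          simp only [List.length_take, List.length_cons]
          omega
        have hslice : PySem.List.slice ((c :: rest).take n) (some 1)
            (some ((((c :: rest).take n).length : Int) - 1)) = ((c :: rest).take n).tail.dropLast := by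
          rw [hulen]
          have h1 : ((n : Int) - 1) = ((n - 1 : Nat) : Int) := by omega
          rw [h1]
          rw [show ((1 : Int)) = ((1 : Nat) : Int) by norm_num]
          rw [PySem.List.slice_natCast]
          rw [List.dropLast_eq_take]
          congr 1
          case e_n =>
            simp only [List.length_tail, List.length_take, List.length_cons]
            omega
          case e_xs => simp [List.drop_one]
        rw [hslice, pvFlipGo_map]
        simp
      · -- u is a single non-paren character: right chunk on both sides
        have hn : n = 1 := by
          have h2' := hdiv0
          simp only [pvDivideGo, if_neg hc1, if_neg hc2] at h2'
          norm_num at h2'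
          omega
        subst hn
        have hu : (c :: rest).take 1 = [c] := by simp
        have hisr : pvIsRightGo ((c :: rest).take 1) 0 = true := by
          rw [hu]; simp [pvIsRightGo, hc1, hc2]
        rw [if_pos hisr]
        have hhead : ((c :: rest).take 1).headD ' ' ≠ ')' := by rw [hu]; simpa using hc2
        simp only [pvStepB]
        rw [if_pos hhead]

-- ===== VERDICT (by name: the statement is the Claim_ definition above) =====
theorem solution_spec : Claim_equal_solution := by
  intro p _ hpre
  unfold Spec_solution solution solution_alt
  congr 1
  apply pvMain
  · omega
  · unfold Pre_solution at hpre
    rw [pvBal_count]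
    omega
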